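-- pv_equiv track=rewrite | github.com/nsriniva/code-challenges | code_challenges/misc.py | checkBlanagrams1
-- ===== SOURCE A (Python) =====
-- from collections import defaultdict
--
-- def checkBlanagrams1(word1, word2):
--
--     if len(word1) != len(word2):
--         return False
--
--     ld = defaultdict(int)
--     for w in word1:
--         ld[w] += 1
--     for w in word2:
--         ld[w] -= 1
--
--     lcd = defaultdict(int)
--     for lc in ld.values():
--         lcd[lc] += 1
--
--     return len(lcd) <= 3 and lcd[-1] == 1 and lcd[1] == 1
-- ===== SOURCE B (Python) =====
-- def checkBlanagrams1(word1, word2):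
--     if len(word1) != len(word2):
--         return False
--     rest = list(word1)
--     misses = 0
--     for ch in word2:
--         if ch in rest:
--             rest.remove(ch)
--         else:
--             misses += 1
--     return misses == 1
-- ===== Notes on version B (the rewrite author's own statement) =====
-- stated objective: alternative
-- what changed: B uses removal-based multiset matching instead of any counting: it walks word2 removing each matched letter from a working copy of word1 and counts the misses, returning misses == 1; A's per-letter difference dict and its second-order histogram of difference values disappear entirely.
import Mathlib
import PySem

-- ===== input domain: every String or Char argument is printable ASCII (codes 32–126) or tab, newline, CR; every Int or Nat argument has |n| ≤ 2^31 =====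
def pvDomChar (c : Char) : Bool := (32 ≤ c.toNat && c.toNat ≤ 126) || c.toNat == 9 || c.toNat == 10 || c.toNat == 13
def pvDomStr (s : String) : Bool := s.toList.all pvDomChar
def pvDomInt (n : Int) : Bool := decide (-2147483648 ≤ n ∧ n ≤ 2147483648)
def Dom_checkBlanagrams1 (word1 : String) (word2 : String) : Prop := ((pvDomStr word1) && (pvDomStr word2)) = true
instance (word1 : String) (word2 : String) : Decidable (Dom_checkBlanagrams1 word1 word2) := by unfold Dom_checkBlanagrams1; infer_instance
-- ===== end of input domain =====

-- B replaces A's count-difference dict and its second-order histogram by removal-based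
-- multiset matching: walk word2 removing each matched letter from a copy of word1,
-- count the misses, and return misses == 1 (alternative decomposition, no counters).

-- ===== PORT A =====
def checkBlanagrams1 (word1 : String) (word2 : String) : Bool :=
  if PySem.Str.len word1 ≠ PySem.Str.len word2 then false
  else
    -- ld = defaultdict(int); for w in word1: ld[w] += 1; for w in word2: ld[w] -= 1
    let ld1 : PySem.Dict Char Int :=
      word1.toList.foldl (fun d w => d.modify w 0 (· + 1)) PySem.Dict.empty
    let ld : PySem.Dict Char Int :=
      word2.toList.foldl (fun d w => d.modify w 0 (· - 1)) ld1
    -- lcd = defaultdict(int); for lc in ld.values(): lcd[lc] += 1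
    let lcd : PySem.Dict Int Int :=
      ld.values.foldl (fun d lc => d.modify lc 0 (· + 1)) PySem.Dict.empty
    decide (lcd.size ≤ 3) && (lcd.getD (-1) 0 == 1) && (lcd.getD 1 0 == 1)

-- ===== PORT B =====
-- one loop step: 'if ch in rest: rest.remove(ch) else: misses += 1'
-- (PySem.List.remove? returns none exactly when ch is not in rest)
def blanStep (st : List Char × Int) (ch : Char) : List Char × Int :=
  match PySem.List.remove? st.1 ch with
  | some r => (r, st.2)
  | none => (st.1, st.2 + 1)

def checkBlanagrams1_alt (word1 : String) (word2 : String) : Bool :=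
  if PySem.Str.len word1 ≠ PySem.Str.len word2 then false
  else
    let st := word2.toList.foldl blanStep (word1.toList, 0)
    st.2 == 1

-- ===== PRECONDITION & SPEC =====
def Spec_checkBlanagrams1 (word1 : String) (word2 : String) (out : Bool) : Prop := out = checkBlanagrams1_alt word1 word2
instance (word1 : String) (word2 : String) (out : Bool) : Decidable (Spec_checkBlanagrams1 word1 word2 out) := by unfold Spec_checkBlanagrams1; infer_instance

-- ===== CLAIM (what is proved, stated in full; the proofs are below) =====
def Claim_equal_checkBlanagrams1 : Prop := ∀ (word1 : String) (word2 : String), Dom_checkBlanagrams1 word1 word2 → Spec_checkBlanagrams1 word1 word2 (checkBlanagrams1 word1 word2)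

-- ===== LEMMAS AND PROOFS =====

-- A's second fold: subtracting one per occurrence
lemma getD_foldl_modify_sub_one (l : List Char) (d : PySem.Dict Char Int) (v : Char) :
    (l.foldl (fun d x => d.modify x 0 (· - 1)) d).getD v 0 = d.getD v 0 - l.count v := by
  induction l generalizing d with
  | nil => simp
  | cons a t ih =>
      rw [List.foldl_cons, ih, PySem.Dict.getD_modify, List.count_cons]
      by_cases h : v = a
      · simp [h]; ring
      · simp [h, Ne.symm h]

-- an int list splits its sum into the positive and the negative part (zeros contribute nothing)
lemma sum_split_pos_neg (L : List Int) :
    L.sum = (L.filter (fun v => 0 < v)).sum + (L.filter (fun v => v < 0)).sum := by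
  induction L with
  | nil => simp
  | cons a t ih =>
      rw [List.filter_cons, List.filter_cons]
      by_cases h1 : 0 < a
      · rw [if_pos (by simpa using h1), if_neg (by simp; omega)]
        simp [ih]; ring
      · by_cases h2 : a < 0
        · rw [if_neg (by simpa using h1), if_pos (by simpa using h2)]
          simp [ih]; ring
        · rw [if_neg (by simpa using h1), if_neg (by simpa using h2)]
          simp [ih]; omega

lemma length_le_sum_of_ones (L : List Int) (h1 : ∀ v ∈ L, 1 ≤ v) : (L.length : Int) ≤ L.sum := by
  induction L with
  | nil => simp
  | cons a t ih =>
      simp only [List.sum_cons, List.length_cons]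
      have := h1 a (by simp)
      have := ih (fun v hv => h1 v (by simp [hv]))
      push_cast; omega

lemma eq_singleton_of_sum_one (L : List Int) (h1 : ∀ v ∈ L, 1 ≤ v) (h : L.sum = 1) : L = [1] := by
  cases L with
  | nil => simp at h
  | cons a t =>
      cases t with
      | nil => simp at h ⊢; omega
      | cons b t' =>
          exfalso
          have ha : 1 ≤ a := h1 a (by simp)
          have := length_le_sum_of_ones (b :: t') (fun v hv => h1 v (by simp [hv]))
          simp at h this
          omega

lemma sum_le_neg_length (L : List Int) (h1 : ∀ v ∈ L, v ≤ -1) : L.sum ≤ -(L.length : Int) := by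
  induction L with
  | nil => simp
  | cons a t ih =>
      simp only [List.sum_cons, List.length_cons]
      have := h1 a (by simp)
      have := ih (fun v hv => h1 v (by simp [hv]))
      push_cast; omega

lemma eq_singleton_of_sum_neg_one (L : List Int) (h1 : ∀ v ∈ L, v ≤ -1) (h : L.sum = -1) : L = [-1] := by
  cases L with
  | nil => simp at h
  | cons a t =>
      cases t with
      | nil => simp at h ⊢; omega
      | cons b t' =>
          exfalso
          have ha : a ≤ -1 := h1 a (by simp)
          have := sum_le_neg_length (b :: t') (fun v hv => h1 v (by simp [hv]))
          simp at h this
          omega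

-- a nodup list containing 1 and -1 of length ≤ 3 has at most one further value
lemma third_value (S : List Int) (hnd : S.Nodup) (h1 : (1 : Int) ∈ S) (h2 : (-1 : Int) ∈ S)
    (hlen : S.length ≤ 3) : ∃ x, ∀ v ∈ S, v = 1 ∨ v = -1 ∨ v = x := by
  classical
  have hcard : ({1, -1} : Finset Int) ⊆ S.toFinset := by
    intro v hv; simp at hv; rcases hv with rfl | rfl <;> simp [h1, h2]
  have h2card : ({1, -1} : Finset Int).card = 2 := by decide
  have hScard : S.toFinset.card = S.length := List.toFinset_card_of_nodup hnd
  have hTcard : (S.toFinset \ {1, -1}).card ≤ 1 := by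
    have hsd : (S.toFinset \ ({1, -1} : Finset Int)).card = S.toFinset.card - ({1, -1} : Finset Int).card := by
      rw [Finset.card_sdiff_of_subset hcard]
    omega
  rcases Finset.card_le_one_iff_subset_singleton.mp hTcard with ⟨x, hx⟩
  refine ⟨x, fun v hv => ?_⟩
  by_cases hv1 : v = 1
  · exact Or.inl hv1
  by_cases hv2 : v = -1
  · exact Or.inr (Or.inl hv2)
  · right; right
    have hvT : v ∈ S.toFinset \ {1, -1} := by
      simp [hv1, hv2, List.mem_toFinset.mpr hv]
    have := Finset.mem_of_subset hx hvT; simpa using this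

-- total count over a nodup superset of the elements is the length
lemma sum_counts_eq_length (K : List Char) (l : List Char) (hnd : K.Nodup)
    (hsub : ∀ c ∈ l, c ∈ K) : (K.map (fun k => (l.count k : Int))).sum = l.length := by
  induction l with
  | nil => simp
  | cons a t ih =>
      have haK : a ∈ K := hsub a (by simp)
      have ih' := ih (fun c hc => hsub c (by simp [hc]))
      have hsplit : (K.map (fun k => ((a :: t).count k : Int))).sum
          = (K.map (fun k => (t.count k : Int) + (if (k == a) = true then (1 : Int) else 0))).sum := by
        congr 1; apply List.map_congr_left; intro k _
        rw [List.count_cons]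
        push_cast
        by_cases h : k = a
        · simp [h]
        · simp [h, Ne.symm h]
      rw [hsplit, PySem.List.sum_map_add_int, ih',
        PySem.List.sum_map_ite_one_zero (fun k => k == a) K,
        ← List.count_eq_countP, List.count_eq_one_of_mem hnd haK]
      push_cast [List.length_cons]; omega

lemma sum_map_neg_int {α : Type} (xs : List α) (f : α → Int) :
    (xs.map (fun x => -(f x))).sum = -((xs.map f).sum) := by
  induction xs with
  | nil => simp
  | cons a t ih => simp [ih]; ring

-- the mathematical core of A: on a zero-sum list of differences, A's histogram test is
-- "the positive part sums to 1"
lemma core (L : List Int) (hsum : L.sum = 0) :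
    ((decide ((PySem.Set.ofList L).length ≤ 3) && ((L.count (-1) : Int) == 1) && ((L.count 1 : Int) == 1)) = true)
      ↔ (L.filter (fun v => 0 < v)).sum = 1 := by
  classical
  have hPN := sum_split_pos_neg L
  constructor
  · rintro h
    simp only [Bool.and_eq_true, decide_eq_true_eq, beq_iff_eq] at h
    obtain ⟨⟨hlen, hm1⟩, hp1⟩ := h
    have hcm1 : L.count (-1) = 1 := by exact_mod_cast hm1
    have hcp1 : L.count 1 = 1 := by exact_mod_cast hp1
    have h1mem : (1 : Int) ∈ L := List.count_pos_iff.mp (by omega)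
    have hm1mem : (-1 : Int) ∈ L := List.count_pos_iff.mp (by omega)
    have hndS : (PySem.Set.ofList L).Nodup := PySem.Set.nodup_ofList L
    obtain ⟨x, hx⟩ := third_value _ hndS ((PySem.Set.mem_ofList _ _).mpr h1mem)
      ((PySem.Set.mem_ofList _ _).mpr hm1mem) hlen
    have hxL : ∀ v ∈ L, v = 1 ∨ v = -1 ∨ v = x := fun v hv =>
      hx v ((PySem.Set.mem_ofList _ _).mpr hv)
    by_cases hxpos : 0 < x
    · -- negatives are all -1, and there is exactly one
      have hNall : ∀ v ∈ L.filter (fun v => v < 0), v = -1 := by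
        intro v hv
        rw [List.mem_filter] at hv
        rcases hxL v hv.1 with rfl | rfl | rfl
        · simp at hv
        · rfl
        · simp at hv; omega
      have hNlen : (L.filter (fun v => v < 0)).length = L.count (-1) := by
        rw [List.count_eq_length_filter,
          show L.filter (fun x => x == -1) = L.filter (fun v => decide (v < 0)) from
            List.filter_congr (fun v hv => ?_)]
        rcases hxL v hv with rfl | rfl | hvx
        · decide
        · decide
        · have h1 : v ≠ -1 := by omega
          have h2 : ¬ v < 0 := by omega
          simp [h1, h2]
      have : (L.filter (fun v => v < 0)).sum = -1 := by
        rw [List.eq_replicate_of_mem hNall, List.sum_replicate, hNlen, hcm1]; simp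
      omega
    · -- positives are all 1, and there is exactly one
      have hPall : ∀ v ∈ L.filter (fun v => 0 < v), v = 1 := by
        intro v hv
        rw [List.mem_filter] at hv
        rcases hxL v hv.1 with rfl | rfl | rfl
        · rfl
        · simp at hv
        · simp at hv; omega
      have hPlen : (L.filter (fun v => 0 < v)).length = L.count 1 := by
        rw [List.count_eq_length_filter,
          show L.filter (fun x => x == 1) = L.filter (fun v => decide (0 < v)) from
            List.filter_congr (fun v hv => ?_)]
        rcases hxL v hv with rfl | rfl | hvx
        · decide
        · decide
        · have h1 : v ≠ 1 := by omega
          have h2 : ¬ 0 < v := by omega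
          simp [h1, h2]
      rw [List.eq_replicate_of_mem hPall, List.sum_replicate, hPlen, hcp1]; simp
  · intro hPsum
    have hP1 : L.filter (fun v => 0 < v) = [1] := by
      refine eq_singleton_of_sum_one _ (fun v hv => ?_) hPsum
      rw [List.mem_filter] at hv; simp at hv; omega
    have hN1 : L.filter (fun v => v < 0) = [-1] := by
      refine eq_singleton_of_sum_neg_one _ (fun v hv => ?_) (by omega)
      rw [List.mem_filter] at hv; simp at hv; omega
    have hall : ∀ v ∈ L, v = 1 ∨ v = -1 ∨ v = 0 := by
      intro v hv
      by_cases h1 : 0 < v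
      · left
        have : v ∈ L.filter (fun v => 0 < v) := List.mem_filter.mpr ⟨hv, by simpa using h1⟩
        rw [hP1] at this; simpa using this
      · by_cases h2 : v < 0
        · right; left
          have : v ∈ L.filter (fun v => v < 0) := List.mem_filter.mpr ⟨hv, by simpa using h2⟩
          rw [hN1] at this; simpa using this
        · right; right; omega
    have hcount1 : L.count 1 = 1 := by
      rw [List.count_eq_length_filter,
        show L.filter (fun x => x == 1) = L.filter (fun v => decide (0 < v)) from
          List.filter_congr (fun v hv => ?_), hP1]
      · rfl
      · rcases hall v hv with rfl | rfl | rfl <;> decide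
    have hcountm1 : L.count (-1) = 1 := by
      rw [List.count_eq_length_filter,
        show L.filter (fun x => x == -1) = L.filter (fun v => decide (v < 0)) from
          List.filter_congr (fun v hv => ?_), hN1]
      · rfl
      · rcases hall v hv with rfl | rfl | rfl <;> decide
    have hlen : (PySem.Set.ofList L).length ≤ 3 := by
      have hnd : (PySem.Set.ofList L).Nodup := PySem.Set.nodup_ofList L
      have hScard := List.toFinset_card_of_nodup hnd
      have hsubset : (PySem.Set.ofList L).toFinset ⊆ ({1, -1, 0} : Finset Int) := by
        intro v hv
        rcases hall v ((PySem.Set.mem_ofList _ _).mp (List.mem_toFinset.mp hv)) with rfl | rfl | rfl <;> simp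
      have := Finset.card_le_card hsubset
      have hc3 : ({1, -1, 0} : Finset Int).card ≤ 3 := by decide
      omega
    simp [hlen, hcount1, hcountm1]

-- B's loop, counts: after processing l2, each character keeps count1 - min(count1, count2)
lemma blan_count (l2 : List Char) (rest : List Char) (m : Int) (c : Char) :
    ((l2.foldl blanStep (rest, m)).1).count c
      = rest.count c - min (rest.count c) (l2.count c) := by
  induction l2 generalizing rest m with
  | nil => simp
  | cons a t ih =>
      rw [List.foldl_cons]
      by_cases hmem : a ∈ rest
      · rw [show blanStep (rest, m) a = (rest.erase a, m) by
          simp [blanStep, PySem.List.remove?_eq_some_erase rest a hmem]]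
        rw [ih]
        have h1 : 1 ≤ rest.count a := List.count_pos_iff.mpr hmem
        by_cases hc : c = a
        · subst hc
          rw [List.count_erase_self, List.count_cons_self]
          omega
        · rw [List.count_erase_of_ne hc, List.count_cons_of_ne (Ne.symm hc)]
      · have hnone : PySem.List.remove? rest a = none :=
          (PySem.List.remove?_eq_none_iff rest a).mpr hmem
        rw [show blanStep (rest, m) a = (rest, m + 1) by simp [blanStep, hnone]]
        rw [ih]
        by_cases hc : c = a
        · subst hc
          have h0 : rest.count c = 0 := List.count_eq_zero.mpr hmem
          omega
        · rw [List.count_cons_of_ne (Ne.symm hc)]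

-- B's loop, misses: each step either shrinks rest by one or adds one miss
lemma blan_misses (l2 : List Char) (rest : List Char) (m : Int) :
    (l2.foldl blanStep (rest, m)).2
      = m + l2.length + (((l2.foldl blanStep (rest, m)).1).length : Int) - rest.length := by
  induction l2 generalizing rest m with
  | nil => simp
  | cons a t ih =>
      rw [List.foldl_cons]
      by_cases hmem : a ∈ rest
      · rw [show blanStep (rest, m) a = (rest.erase a, m) by
          simp [blanStep, PySem.List.remove?_eq_some_erase rest a hmem]]
        rw [ih]
        have hlen : (rest.erase a).length = rest.length - 1 := List.length_erase_of_mem hmem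
        have h1 : 1 ≤ rest.length := List.length_pos_of_mem hmem
        rw [hlen]
        push_cast [List.length_cons]
        omega
      · have hnone : PySem.List.remove? rest a = none :=
          (PySem.List.remove?_eq_none_iff rest a).mpr hmem
        rw [show blanStep (rest, m) a = (rest, m + 1) by simp [blanStep, hnone]]
        rw [ih]
        push_cast [List.length_cons]
        ring

-- the positive part of a sum, written with max
lemma filter_pos_sum (L : List Int) :
    (L.filter (fun v => 0 < v)).sum = (L.map (fun v => max v 0)).sum := by
  induction L with
  | nil => simp
  | cons a t ih =>
      rw [List.filter_cons, List.map_cons, List.sum_cons]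
      by_cases h : 0 < a
      · rw [if_pos (by simpa using h), List.sum_cons, ih, max_eq_left (by omega)]
      · rw [if_neg (by simpa using h), ih, max_eq_right (by omega)]
        omega

-- ===== VERDICT (by name: the statement is the Claim_ definition above) =====
theorem checkBlanagrams1_spec : Claim_equal_checkBlanagrams1 := by
  intro word1 word2 _
  unfold Spec_checkBlanagrams1 checkBlanagrams1 checkBlanagrams1_alt
  by_cases hl : word1.toList.length = word2.toList.length
  case neg =>
    rw [if_pos (by simpa [PySem.Str.len_eq] using hl),
      if_pos (by simpa [PySem.Str.len_eq] using hl)]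
  case pos =>
    rw [if_neg (by simpa [PySem.Str.len_eq] using hl),
      if_neg (by simpa [PySem.Str.len_eq] using hl)]
    dsimp only
    set l1 := word1.toList
    set l2 := word2.toList
    set K := PySem.Set.ofList (l1 ++ l2) with hK
    set dfun : Char → Int := fun k => (l1.count k : Int) - l2.count k with hdfun
    set L := K.map dfun with hL
    -- A's ld.values = L
    have hvals :
        ((l2.foldl (fun d w => d.modify w 0 (· - 1))
          (l1.foldl (fun d w => d.modify w 0 (· + 1)) (PySem.Dict.empty : PySem.Dict Char Int))).values) = L := by
      set ld := (l2.foldl (fun d w => d.modify w 0 (· - 1))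
          (l1.foldl (fun d w => d.modify w 0 (· + 1)) (PySem.Dict.empty : PySem.Dict Char Int))) with hld
      have hkeys : ld.keys = K := by
        rw [hld, PySem.Dict.keys_foldl_modify, PySem.Dict.keys_foldl_modify]
        rw [hK, PySem.Set.ofList_append]
        rfl
      have hnd : ld.keys.Nodup := by rw [hkeys, hK]; exact PySem.Set.nodup_ofList _
      have hgetD : ∀ k, ld.getD k 0 = dfun k := by
        intro k
        rw [hld, getD_foldl_modify_sub_one, PySem.Dict.getD_foldl_modify_add_one, hdfun]
        simp
      rw [PySem.Dict.values_eq_map_keys ld hnd 0, hkeys, hL]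
      exact List.map_congr_left (fun k _ => hgetD k)
    rw [hvals, ← PySem.Dict.counter_eq_foldl]
    have hsize : (PySem.Dict.counter L).size = (PySem.Set.ofList L).length := by
      show (PySem.Dict.counter L).items.length = _
      rw [PySem.Dict.items_counter, List.length_map]
    -- L sums to zero
    have hKnd : K.Nodup := by rw [hK]; exact PySem.Set.nodup_ofList _
    have hsub1 : ∀ c ∈ l1, c ∈ K := fun c hc =>
      (PySem.Set.mem_ofList _ _).mpr (List.mem_append.mpr (Or.inl hc))
    have hsum : L.sum = 0 := by
      have hsplit : L.sum = (K.map (fun k => (l1.count k : Int))).sum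
          - (K.map (fun k => (l2.count k : Int))).sum := by
        rw [hL]
        have h1 : (K.map dfun).sum
            = (K.map (fun k => (l1.count k : Int) + (-((l2.count k : Int))))).sum := rfl
        rw [h1, PySem.List.sum_map_add_int, sum_map_neg_int]
        ring
      rw [hsplit, sum_counts_eq_length K l1 hKnd hsub1,
        sum_counts_eq_length K l2 hKnd (fun c hc =>
          (PySem.Set.mem_ofList _ _).mpr (List.mem_append.mpr (Or.inr hc))), hl]
      ring
    -- B's misses = length of the leftover rest = positive part of L
    set restF := (l2.foldl blanStep (l1, 0)).1 with hrestF
    have hcnt : ∀ c, restF.count c = l1.count c - min (l1.count c) (l2.count c) := fun c =>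
      blan_count l2 l1 0 c
    have hmF : (l2.foldl blanStep (l1, 0)).2 = (restF.length : Int) := by
      rw [blan_misses, ← hrestF, hl]; ring
    have hsubF : ∀ c ∈ restF, c ∈ K := by
      intro c hc
      have hpos : 0 < restF.count c := List.count_pos_iff.mpr hc
      rw [hcnt c] at hpos
      exact hsub1 c (List.count_pos_iff.mp (by omega))
    have hlenF : (restF.length : Int) = (L.filter (fun v => 0 < v)).sum := by
      rw [filter_pos_sum, hL, List.map_map,
        ← sum_counts_eq_length K restF hKnd hsubF]
      congr 1
      apply List.map_congr_left
      intro k _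
      have h := hcnt k
      have hmin : min (l1.count k) (l2.count k) ≤ l1.count k := min_le_left _ _
      simp only [Function.comp, hdfun]
      omega
    -- combine
    have hcore := core L hsum
    rw [Bool.eq_iff_iff, hsize,
      PySem.Dict.getD_counter L (-1), PySem.Dict.getD_counter L 1, hcore, hmF]
    simp only [beq_iff_eq]
    omega
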